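-- pv_equiv track=rewrite | github.com/RJPugsley/Dataset | Scripts/03_bpm_analysis/grid_mapping/stage6_analyze_confidence.py | _triplet_positions
-- ===== SOURCE A (Python) =====
-- from typing import List, Sequence, Set, Any, Tuple, Dict, Optional
--
-- def _triplet_positions(spb: int) -> List[int]:
--     # thirds inside each quarter: 1/12 steps into beat
--     offs = []
--     if spb % 12 != 0:  # we need a grid divisible by 12 to be meaningful
--         return offs
--     third = spb // 12  # one third of a beat
--     for k in range(4):
--         base = k * (spb // 4)
--         offs.extend([(base + third) % spb, (base + 2*third) % spb])
--     return sorted(list(set(offs)))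
-- ===== SOURCE B (Python) =====
-- def _triplet_positions(spb: int):
--     # simpler: sort the eight non-quarter twelfths of the beat directly
--     if spb % 12 != 0:
--         return []
--     third = spb // 12
--     return sorted(i * third for i in range(12) if i % 3 != 0)
-- ===== Notes on version B (the rewrite author's own statement) =====
-- stated objective: simpler
-- what changed: B replaces the four-quarter loop that appends two modulo'd offsets per quarter and then deduplicates with set() before sorting, by a single sorted filtered comprehension over the twelve twelfths of the beat (i*third for i in range(12) if i%3!=0); no quarter bases, no modulo by spb, no set.
import Mathlib
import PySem

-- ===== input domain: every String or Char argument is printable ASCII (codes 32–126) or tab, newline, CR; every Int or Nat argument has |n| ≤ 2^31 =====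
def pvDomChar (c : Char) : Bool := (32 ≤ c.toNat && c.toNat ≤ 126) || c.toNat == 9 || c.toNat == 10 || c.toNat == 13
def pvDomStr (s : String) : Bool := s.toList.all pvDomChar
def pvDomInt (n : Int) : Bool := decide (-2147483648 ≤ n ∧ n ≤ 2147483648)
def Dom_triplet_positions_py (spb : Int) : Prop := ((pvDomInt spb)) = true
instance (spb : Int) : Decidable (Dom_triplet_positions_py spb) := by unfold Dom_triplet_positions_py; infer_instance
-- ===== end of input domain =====

-- B computes the eight triplet offsets as one sorted filtered comprehension over the
-- twelve twelfths of the beat (no quarter loop, no set, no modulo by spb); objective: simpler.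

-- ===== PORT A =====
def triplet_positions_py (spb : Int) : List Int :=
  if PySem.Int.mod spb 12 ≠ 0 then []
  else
    let third := PySem.Int.floordiv spb 12
    let offs := (PySem.List.pyRange 0 4 1).foldl
      (fun offs k =>
        let base := k * PySem.Int.floordiv spb 4
        offs ++ [PySem.Int.mod (base + third) spb, PySem.Int.mod (base + 2 * third) spb]) []
    PySem.List.sorted (PySem.Set.ofList offs) (fun x => x) false

-- ===== PORT B =====
def triplet_positions_py_alt (spb : Int) : List Int :=
  if PySem.Int.mod spb 12 ≠ 0 then []
  else
    let third := PySem.Int.floordiv spb 12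
    PySem.List.sorted
      (((PySem.List.pyRange 0 12 1).filter (fun i => PySem.Int.mod i 3 != 0)).map
        (fun i => i * third))
      (fun x => x) false

-- ===== PRECONDITION & SPEC =====
-- Pre_ excludes only spb = 0, where A raises ZeroDivisionError at '(base + third) % spb'.
def Pre_triplet_positions_py (spb : Int) : Prop := spb ≠ 0
instance (spb : Int) : Decidable (Pre_triplet_positions_py spb) := by unfold Pre_triplet_positions_py; infer_instance

def pvWitness_triplet_positions_py : Int := 24

def Spec_triplet_positions_py (spb : Int) (out : List Int) : Prop := out = triplet_positions_py_alt spb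
instance (spb : Int) (out : List Int) : Decidable (Spec_triplet_positions_py spb out) := by unfold Spec_triplet_positions_py; infer_instance

-- ===== CLAIM =====
def Claim_equal_triplet_positions_py : Prop := ∀ (spb : Int), Dom_triplet_positions_py spb → Pre_triplet_positions_py spb → Spec_triplet_positions_py spb (triplet_positions_py spb)

-- ===== LEMMAS AND PROOFS =====

-- c*t mod 12*t is c*t itself for 0 < c < 12 and t ≠ 0
theorem pv_mod_small (c t : Int) (ht : t ≠ 0) (hc0 : 0 < c) (hc : c < 12) :
    PySem.Int.mod (c * t) (12 * t) = c * t := by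
  rcases lt_or_gt_of_ne ht with hneg | hpos
  · have hb : (12 : Int) * t < 0 := by nlinarith
    obtain ⟨hlo, hhi⟩ := PySem.Int.mod_neg_bounds (a := c * t) hb
    have hsum := PySem.Int.floordiv_mul_add_mod (c * t) (12 * t)
    set q := PySem.Int.floordiv (c * t) (12 * t) with hq
    set m := PySem.Int.mod (c * t) (12 * t) with hm
    have hq0 : q = 0 := by nlinarith [mul_pos (mul_pos (by norm_num : (0:Int) < 12) (by nlinarith : (0:Int) < -t)) (by nlinarith : (0:Int) < -t)]
    nlinarith
  · rw [PySem.Int.mod_eq_emod_of_pos (by nlinarith)]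
    exact Int.emod_eq_of_lt (by positivity) (by nlinarith)

theorem pv_div12 (t : Int) : PySem.Int.floordiv (12 * t) 12 = t := by
  rw [PySem.Int.floordiv_eq_iff_of_pos (by omega)]; constructor <;> nlinarith

-- A's accumulated offs list on 12*t, t ≠ 0, is the eight twelfths in beat order
theorem pv_a_eq (t : Int) (ht : t ≠ 0) :
    triplet_positions_py (12 * t)
      = PySem.List.sorted ([1*t, 2*t, 4*t, 5*t, 7*t, 8*t, 10*t, 11*t]) (fun x => x) false := by
  have hd4 : PySem.Int.floordiv (12 * t) 4 = 3 * t := by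
    rw [PySem.Int.floordiv_eq_iff_of_pos (by omega)]; constructor <;> nlinarith
  have hr4 : PySem.List.pyRange 0 4 1 = [0, 1, 2, 3] := by decide
  unfold triplet_positions_py
  rw [if_neg (by simp)]
  simp only [pv_div12, hd4, hr4, List.foldl, List.nil_append, List.cons_append]
  have e1 : (0 : Int) * (3 * t) + t = 1 * t := by ring
  have e2 : (0 : Int) * (3 * t) + 2 * t = 2 * t := by ring
  have e3 : (1 : Int) * (3 * t) + t = 4 * t := by ring
  have e4 : (1 : Int) * (3 * t) + 2 * t = 5 * t := by ring
  have e5 : (2 : Int) * (3 * t) + t = 7 * t := by ring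
  have e6 : (2 : Int) * (3 * t) + 2 * t = 8 * t := by ring
  have e7 : (3 : Int) * (3 * t) + t = 10 * t := by ring
  have e8 : (3 : Int) * (3 * t) + 2 * t = 11 * t := by ring
  rw [e1, e2, e3, e4, e5, e6, e7, e8,
      pv_mod_small 1 t ht (by omega) (by omega), pv_mod_small 2 t ht (by omega) (by omega),
      pv_mod_small 4 t ht (by omega) (by omega), pv_mod_small 5 t ht (by omega) (by omega),
      pv_mod_small 7 t ht (by omega) (by omega), pv_mod_small 8 t ht (by omega) (by omega),
      pv_mod_small 10 t ht (by omega) (by omega), pv_mod_small 11 t ht (by omega) (by omega)]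
  have hnodup : ([1*t, 2*t, 4*t, 5*t, 7*t, 8*t, 10*t, 11*t] : List Int).Nodup := by
    simp [List.nodup_cons]; omega
  rw [PySem.Set.ofList_eq_self_of_nodup _ hnodup]

-- B on 12*t sorts the same eight values
theorem pv_b_eq (t : Int) :
    triplet_positions_py_alt (12 * t)
      = PySem.List.sorted ([1*t, 2*t, 4*t, 5*t, 7*t, 8*t, 10*t, 11*t]) (fun x => x) false := by
  have hf : (PySem.List.pyRange 0 12 1).filter (fun i => PySem.Int.mod i 3 != 0)
      = [1, 2, 4, 5, 7, 8, 10, 11] := by decide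
  unfold triplet_positions_py_alt
  rw [if_neg (by simp), pv_div12]
  simp only [hf, List.map]

-- ===== VERDICT =====
theorem triplet_positions_py_spec : Claim_equal_triplet_positions_py := by
  intro spb _ hpre
  unfold Spec_triplet_positions_py
  by_cases h : PySem.Int.mod spb 12 = 0
  · obtain ⟨t, ht⟩ := (PySem.Int.mod_eq_zero_iff_dvd spb 12).mp h
    subst ht
    have htne : t ≠ 0 := by intro h0; apply hpre; rw [h0]; ring
    rw [pv_a_eq t htne, pv_b_eq t]
  · unfold triplet_positions_py triplet_positions_py_alt
    rw [if_pos h, if_pos h]
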